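-- pv_equiv track=rewrite | github.com/tehrafi/NTNU-1 | Informatikk/julekalender_knowit/5/5.py | all_after
-- ===== SOURCE A (Python) =====
-- def combine(num1, num2):
--     return int(str(num1) + str(num2))
--
-- def all_after(a):
--     temp = list()
--     j = 0
--     while j < len(a):
--         lst = list()
--         for i in range(0, j):
--             lst.append(a[i])
--
--         for i in range(j, len(a), 2):
--             try:
--                 lst.append(combine(a[i], a[i+1]))
--             except IndexError:
--                 lst.append(a[-1])
--
--         temp.append(lst)
--         j += 1
--     return temp
-- ===== SOURCE B (Python) =====
-- def combine(num1, num2):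
--     return int(str(num1) + str(num2))
--
-- def all_after(a):
--     n = len(a)
--     pairs = [combine(a[i], a[i + 1]) for i in range(n - 1)]
--     return [a[:j] + pairs[j::2] + ([a[-1]] if (n - 1 - j) % 2 == 0 else [])
--             for j in range(n)]
-- ===== Notes on version B (the rewrite author's own statement) =====
-- stated objective: faster
-- what changed: B precomputes the combined-pair table once and builds each row by slicing (prefix a[:j] + strided slice pairs[j::2] + a parity-chosen tail) in a single comprehension, instead of A's while loop with two inner append loops and a try/except IndexError fallback; combine (str-concat + int parse) is called n-1 times instead of O(n^2) times.
import Mathlib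
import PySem

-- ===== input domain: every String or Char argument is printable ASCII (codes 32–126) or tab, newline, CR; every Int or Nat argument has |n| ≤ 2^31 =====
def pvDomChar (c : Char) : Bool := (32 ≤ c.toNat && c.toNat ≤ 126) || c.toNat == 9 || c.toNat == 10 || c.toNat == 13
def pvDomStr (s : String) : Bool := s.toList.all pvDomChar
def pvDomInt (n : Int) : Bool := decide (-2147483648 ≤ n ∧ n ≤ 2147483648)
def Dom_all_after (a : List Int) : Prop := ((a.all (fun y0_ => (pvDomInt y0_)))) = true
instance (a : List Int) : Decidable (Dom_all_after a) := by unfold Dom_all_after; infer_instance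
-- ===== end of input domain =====

-- B replaces A's while loop with two inner append loops and a try/except IndexError fallback by a
-- precomputed pair table, and builds each row as prefix slice ++ strided slice pairs[j::2] ++ parity tail.

-- ===== PORT A =====
-- combine(num1, num2) = int(str(num1) + str(num2)); shared verbatim by A and B (Source B keeps the same
-- helper).  `.getD 0` is unreachable under Pre_all_after: the second argument is nonnegative there,
-- so the concatenation always parses (in Python a negative second argument raises ValueError).
def combine (num1 num2 : Int) : Int :=
  (PySem.Int.ofChars? (PySem.Int.toChars num1 ++ PySem.Int.toChars num2)).getD 0

def all_after (a : List Int) : List (List Int) :=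
  (PySem.List.pyRange 0 (a.length : Int) 1).foldl (fun temp j =>
    let lst := (PySem.List.pyRange 0 j 1).foldl
        (fun lst i => lst ++ [PySem.List.pyGetD a i 0]) []
    -- try: append(combine(a[i], a[i+1])) except IndexError: append(a[-1]);
    -- only a[i+1] can be out of range, so the match on pyGet? a (i+1) is exact
    let lst := (PySem.List.pyRange j (a.length : Int) 2).foldl (fun lst i =>
        match PySem.List.pyGet? a (i + 1) with
        | some y => lst ++ [combine (PySem.List.pyGetD a i 0) y]
        | none => lst ++ [PySem.List.pyGetD a (-1) 0]) lst
    temp ++ [lst]) []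

-- ===== PORT B =====
def all_after_alt (a : List Int) : List (List Int) :=
  let n : Int := (a.length : Int)
  let pairs := (PySem.List.pyRange 0 (n - 1) 1).map (fun i =>
      combine (PySem.List.pyGetD a i 0) (PySem.List.pyGetD a (i + 1) 0))
  (PySem.List.pyRange 0 n 1).map (fun j =>
    PySem.List.slice a none (some j) ++
    (PySem.List.slice? pairs (some j) none 2).getD [] ++
    (if PySem.Int.mod (n - 1 - j) 2 = 0 then [PySem.List.pyGetD a (-1) 0] else []))

-- ===== PRECONDITION & SPEC =====
-- Pre_ excludes exactly the inputs on which A raises: combine concatenates str(a[i]) ++ str(a[i+1]),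
-- and a negative element at any index ≥ 1 makes int() raise ValueError (not caught by A).
def Pre_all_after (a : List Int) : Prop := ∀ x ∈ a.drop 1, 0 ≤ x
instance (a : List Int) : Decidable (Pre_all_after a) := by unfold Pre_all_after; infer_instance
def pvWitness_all_after : List Int := [-3, 4, 5]
def Spec_all_after (a : List Int) (out : List (List Int)) : Prop := out = all_after_alt a
instance (a : List Int) (out : List (List Int)) : Decidable (Spec_all_after a out) := by unfold Spec_all_after; infer_instance

-- ===== CLAIM (what is proved, stated in full; the proofs are below) =====
def Claim_equal_all_after : Prop := ∀ (a : List Int), Dom_all_after a → Pre_all_after a → Spec_all_after a (all_after a)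

-- ===== LEMMAS AND PROOFS =====

-- the common shape of A's second inner loop and of B's strided slice + parity tail, from index j on
def tailRows (a : List Int) (j : Nat) : List Int :=
  if _h : j + 1 < a.length then
    combine (a.getD j 0) (a.getD (j + 1) 0) :: tailRows a (j + 2)
  else if j < a.length then [a.getD (a.length - 1) 0]
  else []
termination_by a.length - j
decreasing_by omega

def every2 {α : Type} : List α → List α
  | [] => []
  | [x] => [x]
  | x :: _ :: rest => x :: every2 rest

lemma pyGetD_neg1 (a : List Int) (h : a ≠ []) :
    PySem.List.pyGetD a (-1) 0 = a.getD (a.length - 1) 0 := by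
  rw [PySem.List.pyGetD_neg_one a 0 h, List.getLast_eq_getElem,
    List.getD_eq_getElem a 0 (by have := List.length_pos_iff.mpr h; omega)]

lemma pyRange_two_nil (j n : Int) (h : n ≤ j) : PySem.List.pyRange j n 2 = [] := by
  rw [PySem.List.pyRange_of_pos j n (by norm_num)]
  simp [show ¬ j < n by omega]

lemma pyRange_two_cons (j n : Int) (h : j < n) :
    PySem.List.pyRange j n 2 = j :: PySem.List.pyRange (j + 2) n 2 := by
  rw [PySem.List.pyRange_of_pos j n (by norm_num),
    PySem.List.pyRange_of_pos (j + 2) n (by norm_num)]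
  have hc : ((n - j + 2 - 1) / 2).toNat
      = (if j + 2 < n then ((n - (j + 2) + 2 - 1) / 2).toNat else 0) + 1 := by
    split_ifs with h2 <;> omega
  rw [if_pos h, hc, List.range_succ_eq_map]
  simp only [List.map_cons, List.map_map, Nat.cast_zero, mul_zero, add_zero]
  congr 1
  apply List.map_congr_left
  intro k _
  simp only [Function.comp_apply]
  push_cast
  ring

lemma loopA (a : List Int) : ∀ m (j : Nat) (lst : List Int), a.length - j ≤ m →
    (PySem.List.pyRange (j : Int) (a.length : Int) 2).foldl (fun lst i =>
        match PySem.List.pyGet? a (i + 1) with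
        | some y => lst ++ [combine (PySem.List.pyGetD a i 0) y]
        | none => lst ++ [PySem.List.pyGetD a (-1) 0]) lst
      = lst ++ tailRows a j := by
  intro m
  induction m with
  | zero =>
    intro j lst hm
    rw [pyRange_two_nil _ _ (by exact_mod_cast (by omega : a.length ≤ j)),
      tailRows]
    simp [show ¬ j + 1 < a.length by omega, show ¬ j < a.length by omega]
  | succ m ih =>
    intro j lst hm
    by_cases hj : j < a.length
    · rw [pyRange_two_cons _ _ (by exact_mod_cast hj)]
      simp only [List.foldl_cons]
      by_cases hj1 : j + 1 < a.length
      · have hget : PySem.List.pyGet? a ((j : Int) + 1) = some (a.getD (j + 1) 0) := by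
          rw [show ((j : Int) + 1) = ((j + 1 : Nat) : Int) by push_cast; ring,
            PySem.List.pyGet?_natCast, List.getElem?_eq_getElem hj1,
            List.getD_eq_getElem a 0 hj1]
        rw [hget]
        simp only
        rw [show ((j : Int) + 2) = ((j + 2 : Nat) : Int) by push_cast; ring,
          ih (j + 2) _ (by omega)]
        conv_rhs => rw [tailRows]
        rw [dif_pos hj1]
        simp [PySem.List.pyGetD_natCast, List.append_assoc]
      · have hget : PySem.List.pyGet? a ((j : Int) + 1) = none := by
          rw [show ((j : Int) + 1) = ((j + 1 : Nat) : Int) by push_cast; ring,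
            PySem.List.pyGet?_natCast, List.getElem?_eq_none (by omega)]
        rw [hget]
        simp only
        rw [show ((j : Int) + 2) = ((j + 2 : Nat) : Int) by push_cast; ring,
          ih (j + 2) _ (by omega)]
        conv_rhs => rw [tailRows]
        rw [dif_neg hj1, if_pos hj, tailRows]
        simp [show ¬ j + 2 + 1 < a.length by omega, show ¬ j + 2 < a.length by omega,
          pyGetD_neg1 a (by intro h; subst h; simp at hj)]
    · rw [pyRange_two_nil _ _ (by exact_mod_cast (by omega : a.length ≤ j)), tailRows]
      simp [show ¬ j + 1 < a.length by omega, hj]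

lemma every2_eq_filterMap {α : Type} (l : List α) :
    every2 l = List.filterMap (fun k => l[2 * k]?) (List.range ((l.length + 1) / 2)) := by
  induction l using every2.induct with
  | case1 => simp [every2]
  | case2 x => simp [every2]
  | case3 x y rest ih =>
    have hlen : (((x :: y :: rest).length + 1) / 2) = (rest.length + 1) / 2 + 1 := by
      simp only [List.length_cons]; omega
    rw [every2, hlen, List.range_succ_eq_map, List.filterMap_cons]
    simp only [Nat.mul_zero, List.getElem?_cons_zero, List.filterMap_map]
    rw [ih]
    congr 1

lemma slice2 {α : Type} (p : List α) (j : Nat) :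
    (PySem.List.slice? p (some (j : Int)) none 2).getD [] = every2 (List.drop j p) := by
  unfold PySem.List.slice? PySem.List.sliceIndices
  norm_num
  rw [if_neg (show ¬ (j:Int) < 0 by omega)]
  by_cases hj : j ≤ p.length
  · rw [min_eq_left (by exact_mod_cast hj)]
    rw [show (if (j:Int) < (p.length:Int) then (((p.length:Int) - (j:Int) + 2 - 1) / 2).toNat else 0)
        = ((List.drop j p).length + 1) / 2 from by
      rw [List.length_drop]; split_ifs with h <;> omega]
    rw [every2_eq_filterMap]
    apply List.filterMap_congr
    intro k _
    rw [List.getElem?_drop]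
    congr 1
  · rw [min_eq_right (by exact_mod_cast (by omega : p.length ≤ j))]
    rw [if_neg (by omega), List.drop_of_length_le (by omega)]
    simp [every2]

-- the pair table of B, in Nat form
def pairsN (a : List Int) : List Int :=
  (List.range (a.length - 1)).map (fun i => combine (a.getD i 0) (a.getD (i + 1) 0))

lemma keyB (a : List Int) : ∀ m (j : Nat), a.length - j ≤ m → j < a.length →
    every2 ((pairsN a).drop j) ++
        (if (a.length - 1 - j) % 2 = 0 then [a.getD (a.length - 1) 0] else [])
      = tailRows a j := by
  intro m
  induction m with
  | zero => intro j hm hj; omega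
  | succ m ih =>
    intro j hm hj
    have hlenp : (pairsN a).length = a.length - 1 := by simp [pairsN]
    by_cases hj1 : j + 1 < a.length
    · have hjp : j < (pairsN a).length := by omega
      have hdropj : (pairsN a).drop j = (pairsN a)[j] :: (pairsN a).drop (j + 1) :=
        List.drop_eq_getElem_cons hjp
      have hgetj : (pairsN a)[j] = combine (a.getD j 0) (a.getD (j + 1) 0) := by
        simp [pairsN, List.getElem_map, List.getElem_range]
      rw [tailRows, dif_pos hj1]
      by_cases hj2 : j + 1 < (pairsN a).length
      · have hdropj1 : (pairsN a).drop (j + 1) = (pairsN a)[j + 1] :: (pairsN a).drop (j + 2) :=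
          List.drop_eq_getElem_cons hj2
        rw [hdropj, hdropj1, every2, hgetj, List.cons_append]
        congr 1
        rw [show a.length - 1 - j = (a.length - 1 - (j + 2)) + 2 by omega]
        rw [show ((a.length - 1 - (j + 2)) + 2) % 2 = (a.length - 1 - (j + 2)) % 2 by omega]
        exact ih (j + 2) (by omega) (by omega)
      · have hdropj1 : (pairsN a).drop (j + 1) = [] := List.drop_of_length_le (by omega)
        rw [hdropj, hdropj1, every2, hgetj]
        have hpar : ¬ (a.length - 1 - j) % 2 = 0 := by omega
        rw [if_neg hpar, tailRows]
        simp [show ¬ j + 2 + 1 < a.length by omega, show ¬ j + 2 < a.length by omega]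
    · have : (pairsN a).drop j = [] := List.drop_of_length_le (by omega)
      rw [this, tailRows, dif_neg hj1, if_pos hj]
      have hpar : (a.length - 1 - j) % 2 = 0 := by omega
      rw [if_pos hpar, every2]
      simp

lemma prefix_eq (a : List Int) (j : Nat) (hj : j ≤ a.length) :
    (PySem.List.pyRange 0 (j : Int) 1).foldl
        (fun lst i => lst ++ [PySem.List.pyGetD a i 0]) []
      = a.take j := by
  rw [PySem.List.foldl_append_singleton_eq_map, List.nil_append,
    PySem.List.pyRange_zero_nat j, List.map_map]
  apply List.ext_getElem
  · simp [hj]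
  · intro k h1 h2
    simp only [List.getElem_map, List.getElem_range, Function.comp_apply,
      PySem.List.pyGetD_natCast, List.getElem_take]
    simp only [List.length_map, List.length_range] at h1
    rw [List.getD_eq_getElem a 0 (by omega)]

lemma pairs_eq (a : List Int) :
    (PySem.List.pyRange 0 ((a.length : Int) - 1) 1).map (fun i =>
        combine (PySem.List.pyGetD a i 0) (PySem.List.pyGetD a (i + 1) 0))
      = pairsN a := by
  rw [PySem.List.pyRange_one, List.map_map]
  have : ((a.length : Int) - 1 - 0).toNat = a.length - 1 := by omega
  rw [this]
  apply List.map_congr_left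
  intro k _
  simp only [Function.comp_apply, zero_add]
  rw [show ((k : Int) + 1) = ((k + 1 : Nat) : Int) by push_cast; ring]
  simp only [PySem.List.pyGetD_natCast]

lemma row_eq (a : List Int) (j : Nat) (hj : j < a.length) :
    a.take j ++ tailRows a j
      = PySem.List.slice a none (some (j : Int)) ++
        (PySem.List.slice? (pairsN a) (some (j : Int)) none 2).getD [] ++
        (if PySem.Int.mod ((a.length : Int) - 1 - (j : Int)) 2 = 0
          then [PySem.List.pyGetD a (-1) 0] else []) := by
  have hmod : PySem.Int.mod ((a.length : Int) - 1 - (j : Int)) 2 = 0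
      ↔ (a.length - 1 - j) % 2 = 0 := by
    rw [show ((a.length : Int) - 1 - (j : Int)) = ((a.length - 1 - j : Nat) : Int) by omega]
    rw [show (2 : Int) = ((2 : Nat) : Int) by norm_num, PySem.Int.mod_natCast]
    omega
  rw [PySem.List.slice_to_natCast, slice2, List.append_assoc,
    pyGetD_neg1 a (by intro h; subst h; simp at hj),
    ← keyB a (a.length - j) j (by omega) hj]
  congr 1
  congr 1
  exact if_congr hmod.symm rfl rfl

-- ===== VERDICT (by name: the statement is the Claim_ definition above) =====
theorem all_after_spec : Claim_equal_all_after := by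
  intro a _hdom _hpre
  unfold Spec_all_after all_after all_after_alt
  simp only
  rw [PySem.List.foldl_append_singleton_eq_map, List.nil_append, pairs_eq]
  apply List.map_congr_left
  intro j hjmem
  rw [PySem.List.mem_pyRange_one] at hjmem
  obtain ⟨hj0, hjn⟩ := hjmem
  lift j to Nat using hj0 with jn
  have hjlt : jn < a.length := by exact_mod_cast hjn
  rw [prefix_eq a jn (by omega),
    loopA a (a.length - jn) jn (a.take jn) (by omega)]
  exact row_eq a jn hjlt
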